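-- pv_equiv track=rewrite | github.com/Happy-ryan/PS | 프로그래머스/unrated/133499. 옹알이 （2）/옹알이 （2）.py | check
-- ===== SOURCE A (Python) =====
-- def check(s):
--     ans = []
--     p = 0
--     while p < len(s):
--         if s[p] == 'a':
--             ans.append(s[p : p + 3])
--             p += 3
--         elif s[p] == 'y':
--             ans.append(s[p : p + 2])
--             p += 2
--         elif s[p] == 'w':
--             ans.append(s[p : p + 3])
--             p += 3
--         elif s[p] == 'm':
--             ans.append(s[p : p + 2])
--             p += 2
--         else:
--             ans.append(s[p])
--             p += 1
--     return ans
-- ===== SOURCE B (Python) =====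
-- def check(s):
--     # streaming one-pass: no index arithmetic or slicing; each character either
--     # extends the current token (countdown > 0) or flushes it and starts a new one
--     ans = []
--     buf = ''
--     need = 0
--     for c in s:
--         if need:
--             buf += c
--             need -= 1
--         else:
--             if buf:
--                 ans.append(buf)
--             buf = c
--             need = 2 if c in 'aw' else (1 if c in 'ym' else 0)
--     if buf:
--         ans.append(buf)
--     return ans
-- ===== Notes on version B (the rewrite author's own statement) =====
-- stated objective: alternative
-- what changed: A walks an integer index in a while loop, branching on the lead character and emitting each token as a slice s[p:p+k]; B never indexes or slices: it streams the characters once through a (buffer, countdown) accumulator, each char either extending the current token or flushing it and opening a new one.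
import Mathlib
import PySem

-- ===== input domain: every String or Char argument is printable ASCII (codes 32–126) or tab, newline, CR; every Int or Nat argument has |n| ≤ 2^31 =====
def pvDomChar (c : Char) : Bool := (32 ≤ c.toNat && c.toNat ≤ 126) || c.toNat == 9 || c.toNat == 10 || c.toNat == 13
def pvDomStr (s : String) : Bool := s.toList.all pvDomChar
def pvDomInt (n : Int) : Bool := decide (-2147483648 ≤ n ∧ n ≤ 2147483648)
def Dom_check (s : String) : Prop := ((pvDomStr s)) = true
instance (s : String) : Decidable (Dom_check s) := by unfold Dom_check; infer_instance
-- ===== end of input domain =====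

-- B replaces A's index-and-slice while loop by a single streaming pass with a
-- (buffer, countdown) accumulator (alternative decomposition, same O(n) cost).

-- ===== PORT A =====
-- A's while loop over index p; p starts at 0 and only grows, so a Nat index is exact.
-- s[p:p+k] → PySem.List.slice on the code points; s[p] (in range by the loop guard) → cs[p].
def checkLoop (cs : List Char) (p : Nat) : List String :=
  if h : p < cs.length then
    if cs[p] = 'a' then
      String.ofList (PySem.List.slice cs (some (p : Int)) (some ((p : Int) + 3))) :: checkLoop cs (p + 3)
    else if cs[p] = 'y' then
      String.ofList (PySem.List.slice cs (some (p : Int)) (some ((p : Int) + 2))) :: checkLoop cs (p + 2)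
    else if cs[p] = 'w' then
      String.ofList (PySem.List.slice cs (some (p : Int)) (some ((p : Int) + 3))) :: checkLoop cs (p + 3)
    else if cs[p] = 'm' then
      String.ofList (PySem.List.slice cs (some (p : Int)) (some ((p : Int) + 2))) :: checkLoop cs (p + 2)
    else
      String.ofList [cs[p]] :: checkLoop cs (p + 1)
  else []
termination_by cs.length - p
decreasing_by all_goals exact Nat.sub_lt_sub_left (by assumption) (Nat.lt_add_of_pos_right (by decide))

def check (s : String) : List String := checkLoop s.toList 0

-- ===== PORT B =====
-- need = 2 if c in 'aw' else (1 if c in 'ym' else 0)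
def bNeed (c : Char) : Nat :=
  if c ∈ ['a', 'w'] then 2 else if c ∈ ['y', 'm'] then 1 else 0

-- the for-loop over the characters as structural recursion carrying (ans, buf, need);
-- the string buffer buf is kept as its List Char (exact: only concatenation is used);
-- the post-loop 'if buf: ans.append(buf)' is the base case.
def bFold (cs : List Char) (ans : List String) (buf : List Char) (need : Nat) : List String :=
  match cs with
  | [] => if buf.isEmpty then ans else ans ++ [String.ofList buf]
  | c :: rest =>
    if need ≠ 0 then
      bFold rest ans (buf ++ [c]) (need - 1)
    else
      bFold rest (if buf.isEmpty then ans else ans ++ [String.ofList buf]) [c] (bNeed c)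

def check_alt (s : String) : List String := bFold s.toList [] [] 0

-- ===== PRECONDITION & SPEC =====
def Spec_check (s : String) (out : List String) : Prop := out = check_alt s
instance (s : String) (out : List String) : Decidable (Spec_check s out) := by unfold Spec_check; infer_instance

-- ===== CLAIM (what is proved, stated in full; the proofs are below) =====
def Claim_equal_check : Prop := ∀ (s : String), Dom_check s → Spec_check s (check s)

-- ===== LEMMAS AND PROOFS =====

-- consuming `need` characters into a nonempty buffer equals flushing the finished token at once
theorem bFold_eat (need : Nat) (cs : List Char) (ans : List String) (buf : List Char) (hb : buf ≠ []) :
    bFold cs ans buf need =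
      bFold (cs.drop need) (ans ++ [String.ofList (buf ++ cs.take need)]) [] 0 := by
  induction need generalizing cs ans buf with
  | zero =>
    cases cs with
    | nil => simp [bFold, List.isEmpty_iff, hb]
    | cons c rest => simp [bFold, List.isEmpty_iff, hb]
  | succ n ih =>
    cases cs with
    | nil => simp [bFold, List.isEmpty_iff, hb]
    | cons c rest =>
      have : bFold (c :: rest) ans buf (n + 1) = bFold rest ans (buf ++ [c]) n := by
        simp [bFold]
      rw [this, ih rest ans (buf ++ [c]) (by simp)]
      simp

theorem main_lemma (cs : List Char) (p : Nat) (ans : List String) :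
    bFold (cs.drop p) ans [] 0 = ans ++ checkLoop cs p := by
  rw [checkLoop]
  split
  · next h =>
    have hdrop : cs.drop p = cs[p] :: cs.drop (p + 1) := List.drop_eq_getElem_cons h
    rw [hdrop]
    have hstep : bFold (cs[p] :: cs.drop (p + 1)) ans [] 0 =
        bFold (cs.drop (p + 1)) ans [cs[p]] (bNeed cs[p]) := by
      simp [bFold]
    rw [hstep, bFold_eat _ _ _ _ (by simp)]
    have htok : ∀ k : Nat, [cs[p]] ++ (cs.drop (p + 1)).take k =
        PySem.List.slice cs (some (p : Int)) (some ((p : Int) + (k + 1 : Nat))) := by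
      intro k
      rw [show ((p : Int) + (k + 1 : Nat)) = ((p + (k + 1) : Nat) : Int) by push_cast; ring,
          PySem.List.slice_natCast]
      have h1 : p + (k + 1) - p = k + 1 := by omega
      rw [h1, List.drop_eq_getElem_cons h, List.take_succ_cons]
      simp
    by_cases h1 : cs[p] = 'a'
    · rw [if_pos h1]
      have hn : bNeed cs[p] = 2 := by rw [h1]; decide
      rw [hn]
      have := htok 2
      simp only [show ((2:Nat) + 1) = (3:Nat) from rfl] at this
      rw [List.drop_drop, main_lemma cs (p + 1 + 2) (ans ++ [String.ofList ([cs[p]] ++ (cs.drop (p + 1)).take 2)])]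
      rw [this, show p + 1 + 2 = p + 3 by omega]
      simp
    · rw [if_neg h1]
      by_cases h2 : cs[p] = 'y'
      · rw [if_pos h2]
        have hn : bNeed cs[p] = 1 := by rw [h2]; decide
        rw [hn]
        have := htok 1
        simp only [show ((1:Nat) + 1) = (2:Nat) from rfl] at this
        rw [List.drop_drop, main_lemma cs (p + 1 + 1) (ans ++ [String.ofList ([cs[p]] ++ (cs.drop (p + 1)).take 1)])]
        rw [this, show p + 1 + 1 = p + 2 by omega]
        simp
      · rw [if_neg h2]
        by_cases h3 : cs[p] = 'w'
        · rw [if_pos h3]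
          have hn : bNeed cs[p] = 2 := by rw [h3]; decide
          rw [hn]
          have := htok 2
          simp only [show ((2:Nat) + 1) = (3:Nat) from rfl] at this
          rw [List.drop_drop, main_lemma cs (p + 1 + 2) (ans ++ [String.ofList ([cs[p]] ++ (cs.drop (p + 1)).take 2)])]
          rw [this, show p + 1 + 2 = p + 3 by omega]
          simp
        · rw [if_neg h3]
          by_cases h4 : cs[p] = 'm'
          · rw [if_pos h4]
            have hn : bNeed cs[p] = 1 := by rw [h4]; decide
            rw [hn]
            have := htok 1
            simp only [show ((1:Nat) + 1) = (2:Nat) from rfl] at this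
            rw [List.drop_drop, main_lemma cs (p + 1 + 1) (ans ++ [String.ofList ([cs[p]] ++ (cs.drop (p + 1)).take 1)])]
            rw [this, show p + 1 + 1 = p + 2 by omega]
            simp
          · rw [if_neg h4]
            have hn : bNeed cs[p] = 0 := by
              simp [bNeed, h1, h2, h3, h4]
            rw [hn]
            have := htok 0
            simp only [List.take_zero, List.append_nil] at this
            rw [List.drop_zero, List.take_zero, List.append_nil,
                main_lemma cs (p + 1) (ans ++ [String.ofList [cs[p]]])]
            simp only [List.append_assoc, List.singleton_append]
  · next h =>
    have : cs.drop p = [] := List.drop_eq_nil_of_le (by omega)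
    simp [this, bFold]
termination_by cs.length - p
decreasing_by all_goals omega

-- ===== VERDICT (by name: the statement is the Claim_ definition above) =====
theorem check_spec : Claim_equal_check := by
  intro s _
  unfold Spec_check check check_alt
  exact (by simpa using (main_lemma s.toList 0 []).symm)
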